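-- pv_equiv track=rewrite | github.com/Nignik/AdventOfCode2024 | day7/day7.py | get_i
-- ===== SOURCE A (Python) =====
-- def get_i(num, i):
--     base3 = ""
--     while num > 0:
--         base3 = str(num % 3) + base3
--         num //= 3
--
--     if i < len(base3):
--         return int(base3[-(i + 1)])
--     else:
--         return 0
-- ===== SOURCE B (Python) =====
-- def get_i(num, i):
--     if num <= 0 or i >= num.bit_length():
--         return 0
--     return (num // 3 ** i) % 3
-- ===== Notes on version B (the rewrite author's own statement) =====
-- stated objective: simpler
-- what changed: Replaces the digit-by-digit base-3 string construction plus negative string indexing with the closed-form arithmetic (num // 3**i) % 3, guarded by num <= 0 and a bit_length test for positions past the last digit.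
-- outside the precondition, e.g. on get_i(5, -1): A returns 1, B returns 0.0; on get_i(0, -1): A raises IndexError, B returns 0
import Mathlib
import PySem

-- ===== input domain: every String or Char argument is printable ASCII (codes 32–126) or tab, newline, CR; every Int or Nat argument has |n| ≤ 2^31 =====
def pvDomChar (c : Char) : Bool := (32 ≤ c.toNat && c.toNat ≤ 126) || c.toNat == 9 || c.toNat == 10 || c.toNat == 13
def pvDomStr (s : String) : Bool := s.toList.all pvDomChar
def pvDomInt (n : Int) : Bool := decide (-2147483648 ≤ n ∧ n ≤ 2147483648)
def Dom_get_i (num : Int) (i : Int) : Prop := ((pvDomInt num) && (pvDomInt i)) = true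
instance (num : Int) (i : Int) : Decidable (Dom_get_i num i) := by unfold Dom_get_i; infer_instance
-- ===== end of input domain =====

-- B replaces A's base-3 string building + negative indexing by the closed form (num // 3**i) % 3 (objective: simpler).

-- ===== PORT A =====
-- the while-loop: base3 = str(num % 3) + base3; num //= 3   (string kept as List Char)
def pvLoop_get_i (num : Int) (base3 : List Char) : List Char :=
  if _h : 0 < num then
    pvLoop_get_i (PySem.Int.floordiv num 3) (PySem.Int.toChars (PySem.Int.mod num 3) ++ base3)
  else base3
termination_by num.toNat
decreasing_by
  rw [PySem.Int.floordiv_eq_ediv_of_pos (by omega : (0:Int) < 3)]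
  omega

def get_i (num : Int) (i : Int) : Int :=
  let base3 := pvLoop_get_i num []
  if i < (base3.length : Int) then
    -- int(base3[-(i + 1)])
    match PySem.List.pyGet? base3 (-(i + 1)) with
    | some c => (PySem.Int.ofChars? [c]).getD 0   -- int() ValueError is unreachable: base3 holds only digit chars
    | none => 0                                    -- IndexError: Python raises; excluded by Pre_get_i
  else 0

-- ===== PORT B =====
def get_i_alt (num : Int) (i : Int) : Int :=
  if num ≤ 0 ∨ (PySem.Int.bitLength num : Int) ≤ i then 0   -- num <= 0 or i >= num.bit_length()
  else PySem.Int.mod (PySem.Int.floordiv num (3 ^ i.toNat)) 3   -- 3 ** i with i ≥ 0 (Pre_) is 3 ^ i.toNat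

-- ===== PRECONDITION & SPEC =====
-- Pre_ restricts to the natural domain of a digit position, i ≥ 0: for i < 0 Python A either raises
-- IndexError (num ≤ 0, or i ≤ -len-1) or indexes the base-3 string from the LEFT via negative-index
-- wraparound, and Python B's 3**i is a float there (not an int), so both leave the claimed type/behaviour.
def Pre_get_i (num : Int) (i : Int) : Prop := 0 ≤ i
instance (num : Int) (i : Int) : Decidable (Pre_get_i num i) := by unfold Pre_get_i; infer_instance

def pvWitness_get_i : Int × Int := (29, 2)

def Spec_get_i (num : Int) (i : Int) (out : Int) : Prop := out = get_i_alt num i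
instance (num : Int) (i : Int) (out : Int) : Decidable (Spec_get_i num i out) := by unfold Spec_get_i; infer_instance

-- ===== CLAIM (what is proved, stated in full; the proofs are below) =====
def Claim_equal_get_i : Prop := ∀ (num : Int) (i : Int), Dom_get_i num i → Pre_get_i num i → Spec_get_i num i (get_i num i)

-- ===== LEMMAS AND PROOFS =====

-- the char A appends for a digit d < 3
def pvDigitChar (d : Nat) : Char := Char.ofNat (d + 48)

lemma pvToChars_small (d : Nat) (hd : d < 3) :
    PySem.Int.toChars (d : Int) = [pvDigitChar d] := by
  interval_cases d <;> decide

-- the loop builds the reversed little-endian base-3 digit string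
lemma pvLoop_eq (n : Nat) (acc : List Char) :
    pvLoop_get_i (n : Int) acc = ((Nat.digits 3 n).map pvDigitChar).reverse ++ acc := by
  induction n using Nat.strong_induction_on generalizing acc with
  | _ n ih =>
    rcases Nat.eq_zero_or_pos n with h0 | hpos
    · subst h0; rw [pvLoop_get_i]; simp
    · rw [pvLoop_get_i]
      have h1 : (0:Int) < (n:Int) := by exact_mod_cast hpos
      rw [dif_pos h1]
      have hfd : PySem.Int.floordiv (n : Int) 3 = ((n / 3 : Nat) : Int) := by
        exact_mod_cast PySem.Int.floordiv_natCast n 3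
      have hmd : PySem.Int.mod (n : Int) 3 = ((n % 3 : Nat) : Int) := by
        exact_mod_cast PySem.Int.mod_natCast n 3
      rw [hfd, hmd, pvToChars_small _ (Nat.mod_lt n (by omega)),
          ih (n / 3) (Nat.div_lt_self hpos (by omega)),
          Nat.digits_def' (by omega : 1 < 3) hpos]
      simp

-- k-th little-endian digit of n in base 3
lemma pvDigits_getElem (k : Nat) (n : Nat) (hk : k < (Nat.digits 3 n).length) :
    (Nat.digits 3 n)[k] = n / 3 ^ k % 3 := by
  induction k generalizing n with
  | zero =>
    have hn : 0 < n := Nat.pos_of_ne_zero (by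
      intro h; subst h; simp at hk)
    simp [Nat.digits_def' (by omega : 1 < 3) hn]
  | succ k ih =>
    have hn : 0 < n := Nat.pos_of_ne_zero (by
      intro h; subst h; simp at hk)
    have hk' : k < (Nat.digits 3 (n / 3)).length := by
      rw [Nat.digits_def' (by omega : 1 < 3) hn] at hk; simpa using hk
    simp only [Nat.digits_def' (by omega : 1 < 3) hn, List.getElem_cons_succ]
    rw [ih (n / 3) hk', Nat.div_div_eq_div_mul, pow_succ, mul_comm]

lemma pvB_cast (n : Nat) (k : Nat) :
    PySem.Int.mod (PySem.Int.floordiv (n : Int) (3 ^ k)) 3 = ((n / 3 ^ k % 3 : Nat) : Int) := by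
  have h3 : ((3:Int) ^ k) = ((3 ^ k : Nat) : Int) := by push_cast; ring
  rw [h3]
  rw [show PySem.Int.floordiv (n : Int) ((3 ^ k : Nat) : Int) = ((n / 3 ^ k : Nat) : Int) from
    (by exact_mod_cast PySem.Int.floordiv_natCast n (3 ^ k))]
  exact_mod_cast PySem.Int.mod_natCast (n / 3 ^ k) 3

-- n < 3^k bounds the base-3 digit count by k
lemma pvLen3_le (n k : Nat) (hn : 0 < n) (h : n < 3 ^ k) : (Nat.digits 3 n).length ≤ k := by
  have h1 := Nat.length_digits 3 n (by omega) (by omega)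
  have h2 := (Nat.log_lt_iff_lt_pow (by omega : 1 < 3) (by omega : n ≠ 0)).mpr h
  omega

-- ===== VERDICT (by name: the statement is the Claim_ definition above) =====
theorem get_i_spec : Claim_equal_get_i := by
  intro num i _ hi
  have hi' : (0:Int) ≤ i := hi
  unfold Spec_get_i get_i get_i_alt
  by_cases hle : num ≤ 0
  · -- loop never runs: base3 = "", i ≥ 0 is not < 0
    rw [if_pos (Or.inl hle), pvLoop_get_i, dif_neg (by omega)]
    simp only [List.length_nil, Int.natCast_zero]
    rw [if_neg (by omega : ¬ i < (0:Int))]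
  · obtain ⟨n, rfl⟩ : ∃ n : Nat, num = (n : Int) := ⟨num.toNat, by omega⟩
    have hn : 0 < n := by omega
    rw [pvLoop_eq n []]
    simp only []
    set L := (Nat.digits 3 n).map pvDigitChar with hL
    have hlen : (L.reverse ++ []).length = (Nat.digits 3 n).length := by simp [hL]
    obtain ⟨k, rfl⟩ : ∃ k : Nat, i = (k : Int) := ⟨i.toNat, by omega⟩
    by_cases hbl : (PySem.Int.bitLength (n : Int) : Int) ≤ (k : Int)
    · -- i ≥ num.bit_length(): both sides are 0
      rw [if_pos (Or.inr hbl)]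
      have h2k : n < 2 ^ k := by
        have h1 := PySem.Int.lt_two_pow_bitLength (n : Int)
        have h2 : PySem.Int.bitLength (n : Int) ≤ k := by exact_mod_cast hbl
        calc n = (n : Int).natAbs := by simp
          _ < 2 ^ PySem.Int.bitLength (n : Int) := h1
          _ ≤ 2 ^ k := Nat.pow_le_pow_right (by omega) h2
      have h3k : (Nat.digits 3 n).length ≤ k :=
        pvLen3_le n k hn (lt_of_lt_of_le h2k (Nat.pow_le_pow_left (by omega) k))
      rw [hlen, if_neg (by exact_mod_cast Nat.not_lt.mpr h3k)]
    · have hB : ¬((n : Int) ≤ 0 ∨ (PySem.Int.bitLength (n : Int) : Int) ≤ (k : Int)) :=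
        not_or.mpr ⟨hle, hbl⟩
      rw [if_neg hB]
      simp only [Int.toNat_natCast]
      rw [hlen, pvB_cast n k]
      by_cases hk : k < (Nat.digits 3 n).length
      · rw [if_pos (by exact_mod_cast hk)]
        have hkk : (k:Int) + 1 = ((k + 1 : Nat) : Int) := by push_cast; ring
        rw [hkk, PySem.List.pyGet?_neg_natCast (L.reverse ++ []) (k + 1) (by omega)
              (by simp only [hlen]; omega)]
        have hidx : (L.reverse ++ [])[(L.reverse ++ []).length - (k + 1)]? =
            some (pvDigitChar ((Nat.digits 3 n)[k])) := by
          rw [List.append_nil]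
          rw [List.getElem?_eq_getElem (by simp only [List.length_reverse, hL, List.length_map]; omega)]
          rw [List.getElem_reverse]
          simp only [List.length_reverse, hL, List.length_map, List.getElem_map]
          have hj : (Nat.digits 3 n).length - 1 - ((Nat.digits 3 n).length - (k + 1)) = k := by omega
          simp only [hj]
        rw [hidx, pvDigits_getElem k n hk]
        have hd3 : n / 3 ^ k % 3 < 3 := Nat.mod_lt _ (by omega)
        generalize n / 3 ^ k % 3 = d at hd3 ⊢
        interval_cases d <;> decide
      · rw [if_neg (by exact_mod_cast hk)]
        have : n < 3 ^ k :=
          lt_of_lt_of_le (Nat.lt_base_pow_length_digits (by omega))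
            (Nat.pow_le_pow_right (by omega) (by omega))
        rw [Nat.div_eq_of_lt this]
        simp
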